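-- pv_equiv track=rewrite | github.com/RavenInDisguise/Python-Programs | Lab 02/libreriaMonicaJennifer.py | obtenerPares
-- ===== SOURCE A (Python) =====
-- def formarNumInverso(num):
--     """
--     Funcionalidad: Invertir número.
--     Entradas: El número int(num).
--     Salidas: Número invertido int(inverso)
--     """
--     inverso=0
--     while (num>0):
--         residuo=num%10
--         inverso=(inverso*10)+residuo
--         num=num//10
--     return inverso
--
-- def esPar(pnumero):
--     """
--     Funcionalidad: Averiguar si un número es par o no.
--     Entradas: El número int(pnumero).
--     Salidas: Verdadero o falso, de acuerdo a si cumple con el condicional o no.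
--     """
--     if(pnumero%2==0):
--         return True
--
-- def obtenerPares (pnum):
--     """
--     Funcionalidad: Mostrar los números pares que aparezcan en orden.
--     Entradas: El número int(pnum).
--     Salidas: Números pares encontrados en orden int(inverso).
--     """
--     inverso=0
--     while(pnum>0):
--         residuo=pnum%10
--         if (esPar(residuo)):
--             inverso=(inverso*10)+residuo #Se sacan los números pares, pero al revés.
--         pnum=pnum//10
--     return formarNumInverso(inverso)#Se invierten los números pares para que se muestren en orden.
-- ===== SOURCE B (Python) =====
-- def obtenerPares(pnum):
--     """Even digits of pnum, in their original order, as one number.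
--     Single right-to-left pass with an explicit place value: no reversal step."""
--     acc = 0
--     place = 1
--     while pnum > 0:
--         d = pnum % 10
--         if d % 2 == 0:
--             acc += d * place
--             place *= 10
--         pnum //= 10
--     return acc
-- ===== Notes on version B (the rewrite author's own statement) =====
-- stated objective: simpler
-- what changed: A extracts even digits right-to-left into a reversed accumulator and then runs a second digit-reversal loop; B keeps a running place value and builds the answer in order in a single loop, with no helper and no second pass.
-- intended difference: On positive inputs whose least-significant even digit is 0 while some other even digit is nonzero (e.g. 20), A's reverse-then-reverse through an int silently drops those trailing zeros (A(20)=2, A(240)=24), while B returns the even digits in order (20, 240), which is the stated purpose ('mostrar los numeros pares que aparezcan en orden'). — e.g. on obtenerPares(20): A returns 2, B returns 20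
import Mathlib
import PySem

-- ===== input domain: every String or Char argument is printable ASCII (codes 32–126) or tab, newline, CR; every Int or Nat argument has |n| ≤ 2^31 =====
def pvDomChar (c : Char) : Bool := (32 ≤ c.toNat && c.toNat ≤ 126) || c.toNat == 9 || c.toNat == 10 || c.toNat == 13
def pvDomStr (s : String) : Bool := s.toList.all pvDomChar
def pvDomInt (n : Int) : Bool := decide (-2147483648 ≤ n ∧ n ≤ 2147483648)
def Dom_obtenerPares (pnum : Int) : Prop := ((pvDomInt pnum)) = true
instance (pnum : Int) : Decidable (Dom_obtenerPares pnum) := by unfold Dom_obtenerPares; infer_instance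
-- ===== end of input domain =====

-- B replaces A's reversed accumulator + second reversal loop by a single
-- in-order pass with a running place value (objective: simpler); A and B differ
-- only on the D_ inputs stated below.

-- ===== PORT A =====
-- Python 'while' loops are ported as structural recursion on a fuel that starts
-- at pnum.toNat; the loop variable strictly decreases below its start, so the
-- fuel is never exhausted while the Python loop would still run.

-- esPar returns True or None in Python; None is falsy in A's 'if', so Bool.
def esPar (pnumero : Int) : Bool := PySem.Int.mod pnumero 2 == 0

def pvFNILoop : Nat → Int → Int → Int
  | 0, _, inverso => inverso
  | fuel+1, num, inverso =>
    if 0 < num then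
      pvFNILoop fuel (PySem.Int.floordiv num 10) (inverso * 10 + PySem.Int.mod num 10)
    else inverso

def formarNumInverso (num : Int) : Int := pvFNILoop num.toNat num 0

def pvOPLoop : Nat → Int → Int → Int
  | 0, _, inverso => inverso
  | fuel+1, pnum, inverso =>
    if 0 < pnum then
      pvOPLoop fuel (PySem.Int.floordiv pnum 10)
        (if esPar (PySem.Int.mod pnum 10) then inverso * 10 + PySem.Int.mod pnum 10 else inverso)
    else inverso

def obtenerPares (pnum : Int) : Int := formarNumInverso (pvOPLoop pnum.toNat pnum 0)

-- ===== PORT B =====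
def pvAltLoop : Nat → Int → Int → Int → Int
  | 0, _, acc, _ => acc
  | fuel+1, pnum, acc, place =>
    if 0 < pnum then
      if PySem.Int.mod (PySem.Int.mod pnum 10) 2 == 0 then
        pvAltLoop fuel (PySem.Int.floordiv pnum 10) (acc + PySem.Int.mod pnum 10 * place) (place * 10)
      else
        pvAltLoop fuel (PySem.Int.floordiv pnum 10) acc place
    else acc

def obtenerPares_alt (pnum : Int) : Int := pvAltLoop pnum.toNat pnum 0 1

-- ===== PRECONDITION & SPEC =====
-- On positive inputs whose least-significant even digit is 0 while some other even
-- digit is nonzero (e.g. 20), A's reverse-then-reverse through an int silently drops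
-- those trailing zeros and returns 2, while B returns 20 — the even digits in order,
-- which is the function's stated purpose.
def D_obtenerPares (pnum : Int) : Prop :=
  ((Nat.digits 10 pnum.toNat).filter (· % 2 = 0)).head? = some 0 ∧
    ((Nat.digits 10 pnum.toNat).filter (· % 2 = 0)).sum ≠ 0
instance (pnum : Int) : Decidable (D_obtenerPares pnum) := by unfold D_obtenerPares; infer_instance

def Spec_obtenerPares (pnum : Int) (out : Int) : Prop := ¬ D_obtenerPares pnum → out = obtenerPares_alt pnum
instance (pnum : Int) (out : Int) : Decidable (Spec_obtenerPares pnum out) := by unfold Spec_obtenerPares; infer_instance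

def pvDiffWitness_obtenerPares : Int := 20
def pvDiffWitnessOut_obtenerPares : Int × Int := (2, 20)

-- ===== CLAIM (what is proved, stated in full; the proofs are below) =====
def Claim_unchanged_obtenerPares : Prop := ∀ (pnum : Int), Dom_obtenerPares pnum → Spec_obtenerPares pnum (obtenerPares pnum)
def Claim_changed_obtenerPares : Prop := Dom_obtenerPares (pvDiffWitness_obtenerPares) ∧ D_obtenerPares (pvDiffWitness_obtenerPares) ∧ obtenerPares (pvDiffWitness_obtenerPares) = pvDiffWitnessOut_obtenerPares.1 ∧ obtenerPares_alt (pvDiffWitness_obtenerPares) = pvDiffWitnessOut_obtenerPares.2 ∧ pvDiffWitnessOut_obtenerPares.1 ≠ pvDiffWitnessOut_obtenerPares.2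
def Claim_exact_obtenerPares : Prop := ∀ (pnum : Int), Dom_obtenerPares pnum → D_obtenerPares pnum → obtenerPares pnum ≠ obtenerPares_alt pnum

-- ===== LEMMAS AND PROOFS =====

-- proof-side digit helpers: decimal digits of n, least significant first
def pvDigitsF : Nat → Int → List Int
  | 0, _ => []
  | fuel+1, n =>
    if 0 < n then PySem.Int.mod n 10 :: pvDigitsF fuel (PySem.Int.floordiv n 10)
    else []

def pvDigits (n : Int) : List Int := pvDigitsF n.toNat n

def pvEvens (n : Int) : List Int := (pvDigits n).filter (fun d => PySem.Int.mod d 2 == 0)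

-- value of a digit list, least significant digit first
def pvV (ds : List Int) : Int := ds.foldr (fun d a => d + 10 * a) 0

theorem pvV_nil : pvV [] = 0 := rfl
theorem pvV_cons (d : Int) (t : List Int) : pvV (d :: t) = d + 10 * pvV t := rfl

theorem pvStep_lt {n : Int} (h : 0 < n) : (PySem.Int.floordiv n 10).toNat < n.toNat := by
  rw [PySem.Int.floordiv_eq_ediv_of_pos (by norm_num)]
  have h0 := Int.mul_ediv_add_emod n 10
  have h1 := Int.emod_nonneg n (by norm_num : (10:Int) ≠ 0)
  have h2 := Int.emod_lt_of_pos n (by norm_num : (0:Int) < 10)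
  omega

theorem pvDigitsF_congr : ∀ (f1 f2 : Nat) (n : Int), n.toNat ≤ f1 → n.toNat ≤ f2 →
    pvDigitsF f1 n = pvDigitsF f2 n := by
  intro f1
  induction f1 with
  | zero =>
    intro f2 n h1 _
    have hn : ¬ 0 < n := by omega
    cases f2 with
    | zero => rfl
    | succ k => simp [pvDigitsF, hn]
  | succ k ih =>
    intro f2 n h1 h2
    by_cases hn : 0 < n
    · cases f2 with
      | zero => omega
      | succ k2 =>
        have hlt := pvStep_lt hn
        simp only [pvDigitsF, if_pos hn]
        rw [ih k2 _ (by omega) (by omega)]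
    · cases f2 with
      | zero => simp [pvDigitsF, hn]
      | succ k2 => simp [pvDigitsF, hn]

theorem pvDigits_pos {n : Int} (h : 0 < n) :
    pvDigits n = PySem.Int.mod n 10 :: pvDigits (PySem.Int.floordiv n 10) := by
  have hlt := pvStep_lt h
  unfold pvDigits
  obtain ⟨k, hk⟩ : ∃ k, n.toNat = k + 1 := ⟨n.toNat - 1, by omega⟩
  rw [hk]
  simp only [pvDigitsF, if_pos h]
  rw [pvDigitsF_congr k (PySem.Int.floordiv n 10).toNat _ (by omega) (le_refl _)]

theorem pvDigits_nonpos {n : Int} (h : ¬ 0 < n) : pvDigits n = [] := by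
  unfold pvDigits
  have h0 : n.toNat = 0 := by omega
  rw [h0]
  rfl

theorem pvEvens_pos {n : Int} (h : 0 < n) :
    pvEvens n = if PySem.Int.mod (PySem.Int.mod n 10) 2 == 0
      then PySem.Int.mod n 10 :: pvEvens (PySem.Int.floordiv n 10)
      else pvEvens (PySem.Int.floordiv n 10) := by
  unfold pvEvens
  rw [pvDigits_pos h, List.filter_cons]

theorem pvEvens_nonpos {n : Int} (h : ¬ 0 < n) : pvEvens n = [] := by
  unfold pvEvens; rw [pvDigits_nonpos h]; rfl

-- bridge: pvDigits is Nat.digits of pnum.toNat, cast to Int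
theorem pvDigits_eq_natDigits : ∀ (fuel : Nat) (n : Int), n.toNat ≤ fuel →
    pvDigits n = (Nat.digits 10 n.toNat).map (Int.ofNat) := by
  intro fuel
  induction fuel with
  | zero =>
    intro n h
    have hn : ¬ 0 < n := by omega
    rw [pvDigits_nonpos hn]
    have h0 : n.toNat = 0 := by omega
    rw [h0]
    rfl
  | succ k ih =>
    intro n h
    by_cases hn : 0 < n
    · have hlt := pvStep_lt hn
      have hpos : 0 < n.toNat := by omega
      rw [pvDigits_pos hn, ih _ (by omega),
        Nat.digits_def' (by norm_num : 1 < 10) hpos, List.map_cons]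
      have hmod : PySem.Int.mod n 10 = Int.ofNat (n.toNat % 10) := by
        rw [PySem.Int.mod_eq_emod_of_pos (by norm_num)]
        simp only [Int.ofNat_eq_natCast]
        omega
      have hdiv : (PySem.Int.floordiv n 10).toNat = n.toNat / 10 := by
        rw [PySem.Int.floordiv_eq_ediv_of_pos (by norm_num)]
        omega
      rw [hmod, hdiv]
    · rw [pvDigits_nonpos hn]
      have h0 : n.toNat = 0 := by omega
      rw [h0]
      rfl

theorem pvEvens_eq_natEvens (n : Int) :
    pvEvens n = ((Nat.digits 10 n.toNat).filter (fun d => d % 2 = 0)).map (Int.ofNat) := by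
  unfold pvEvens
  rw [pvDigits_eq_natDigits n.toNat n (le_refl _), List.filter_map]
  congr 1
  apply List.filter_congr
  intro d _
  simp only [Function.comp_apply, PySem.Int.mod_eq_emod_of_pos (by norm_num : (0:Int) < 2),
    Int.ofNat_eq_natCast]
  by_cases h : d % 2 = 0 <;> simp [h] <;> omega

-- D_ restated over pvEvens
theorem D_iff (pnum : Int) : D_obtenerPares pnum ↔
    (0 < pnum ∧ (pvEvens pnum).head? = some 0 ∧ ∃ d ∈ pvEvens pnum, d ≠ 0) := by
  unfold D_obtenerPares
  rw [pvEvens_eq_natEvens]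
  set l := (Nat.digits 10 pnum.toNat).filter (fun d => d % 2 = 0) with hl
  constructor
  · rintro ⟨h2, h3⟩
    have h1 : 0 < pnum := by
      by_contra hnp
      have h0 : pnum.toNat = 0 := by omega
      rw [hl, h0] at h2
      simp at h2
    refine ⟨h1, ?_, ?_⟩
    · rw [List.head?_map, h2]; rfl
    · have := (not_iff_not.mpr List.sum_eq_zero_iff).mp h3
      push Not at this
      obtain ⟨x, hx, hxne⟩ := this
      exact ⟨(x : Int), List.mem_map_of_mem hx, by exact_mod_cast hxne⟩
  · rintro ⟨h1, h2, h3⟩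
    refine ⟨?_, ?_⟩
    · rw [List.head?_map] at h2
      cases hh : l.head? with
      | none => rw [hh] at h2; simp at h2
      | some x =>
        rw [hh] at h2
        simp only [Option.map_some] at h2
        have hx : Int.ofNat x = 0 := by injection h2
        have hx0 : x = 0 := by exact_mod_cast (show ((x : Int) = 0) from hx)
        rw [hx0]
    · obtain ⟨d, hd, hdne⟩ := h3
      obtain ⟨x, hx, hxe⟩ := List.mem_map.mp hd
      intro hs
      have hx0 := List.sum_eq_zero_iff.mp hs x hx
      subst hx0
      exact hdne (by simp [← hxe])

theorem pvDigits_bounds : ∀ (fuel : Nat) (n : Int), n.toNat ≤ fuel →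
    ∀ d ∈ pvDigits n, 0 ≤ d ∧ d < 10 := by
  intro fuel
  induction fuel with
  | zero =>
    intro n h d hd
    rw [pvDigits_nonpos (by omega)] at hd
    simp at hd
  | succ k ih =>
    intro n h d hd
    by_cases hn : 0 < n
    · rw [pvDigits_pos hn] at hd
      rcases List.mem_cons.mp hd with h1 | h1
      · subst h1
        exact ⟨PySem.Int.mod_nonneg n (by norm_num), PySem.Int.mod_lt n (by norm_num)⟩
      · exact ih _ (by have := pvStep_lt hn; omega) d h1
    · rw [pvDigits_nonpos hn] at hd; simp at hd

theorem pvEvens_bounds (n : Int) : ∀ d ∈ pvEvens n, 0 ≤ d ∧ d < 10 := by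
  intro d hd
  exact pvDigits_bounds n.toNat n (le_refl _) d (List.mem_of_mem_filter hd)

theorem pvV_nonneg : ∀ (ds : List Int), (∀ d ∈ ds, 0 ≤ d) → 0 ≤ pvV ds := by
  intro ds
  induction ds with
  | nil => intro _; simp [pvV_nil]
  | cons d t ih =>
    intro h
    rw [pvV_cons]
    have h1 : 0 ≤ d := h d (by simp)
    have h2 : 0 ≤ pvV t := ih (fun x hx => h x (by simp [hx]))
    omega

theorem pvV_all_zero : ∀ (ds : List Int), (∀ d ∈ ds, d = 0) → pvV ds = 0 := by
  intro ds
  induction ds with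
  | nil => intro _; rfl
  | cons d t ih =>
    intro h
    rw [pvV_cons, h d (by simp), ih (fun x hx => h x (by simp [hx]))]
    ring

theorem pvV_zero_all : ∀ (ds : List Int), (∀ d ∈ ds, 0 ≤ d ∧ d < 10) → pvV ds = 0 →
    ∀ d ∈ ds, d = 0 := by
  intro ds
  induction ds with
  | nil => intro _ _ d hd; simp at hd
  | cons d t ih =>
    intro hb hv x hx
    rw [pvV_cons] at hv
    have hd : 0 ≤ d ∧ d < 10 := hb d (by simp)
    have ht : 0 ≤ pvV t := pvV_nonneg t (fun y hy => (hb y (by simp [hy])).1)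
    have hd0 : d = 0 := by omega
    have ht0 : pvV t = 0 := by omega
    rcases List.mem_cons.mp hx with h1 | h1
    · omega
    · exact ih (fun y hy => hb y (by simp [hy])) ht0 x h1

-- the two loops of A, characterised by the big-endian fold
theorem pvOP_eq : ∀ (fuel : Nat) (n : Int), n.toNat ≤ fuel → ∀ acc,
    pvOPLoop fuel n acc = List.foldl (fun a d => a * 10 + d) acc (pvEvens n) := by
  intro fuel
  induction fuel with
  | zero =>
    intro n h acc
    rw [pvEvens_nonpos (by omega)]
    rfl
  | succ k ih =>
    intro n h acc
    by_cases hn : 0 < n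
    · have hlt := pvStep_lt hn
      rw [pvOPLoop, if_pos hn, pvEvens_pos hn]
      by_cases hp : esPar (PySem.Int.mod n 10) = true
      · have hp' : (PySem.Int.mod (PySem.Int.mod n 10) 2 == 0) = true := hp
        rw [if_pos hp, if_pos hp', ih _ (by omega), List.foldl_cons]
      · have hp' : ¬ (PySem.Int.mod (PySem.Int.mod n 10) 2 == 0) = true := hp
        rw [if_neg hp, if_neg hp', ih _ (by omega)]
    · rw [pvOPLoop, if_neg hn, pvEvens_nonpos hn]
      rfl

theorem pvFNI_eq : ∀ (fuel : Nat) (n : Int), n.toNat ≤ fuel → ∀ acc,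
    pvFNILoop fuel n acc = List.foldl (fun a d => a * 10 + d) acc (pvDigits n) := by
  intro fuel
  induction fuel with
  | zero =>
    intro n h acc
    rw [pvDigits_nonpos (by omega)]
    rfl
  | succ k ih =>
    intro n h acc
    by_cases hn : 0 < n
    · have hlt := pvStep_lt hn
      rw [pvFNILoop, if_pos hn, pvDigits_pos hn, ih _ (by omega), List.foldl_cons]
    · rw [pvFNILoop, if_neg hn, pvDigits_nonpos hn]
      rfl

-- B's loop, characterised directly by pvV
theorem pvAlt_eq : ∀ (fuel : Nat) (n : Int), n.toNat ≤ fuel → ∀ acc place,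
    pvAltLoop fuel n acc place = acc + place * pvV (pvEvens n) := by
  intro fuel
  induction fuel with
  | zero =>
    intro n h acc place
    rw [pvEvens_nonpos (by omega), pvV_nil]
    show acc = acc + place * 0
    ring
  | succ k ih =>
    intro n h acc place
    by_cases hn : 0 < n
    · have hlt := pvStep_lt hn
      rw [pvAltLoop, if_pos hn, pvEvens_pos hn]
      by_cases hp : (PySem.Int.mod (PySem.Int.mod n 10) 2 == 0) = true
      · rw [if_pos hp, if_pos hp, ih _ (by omega), pvV_cons]
        ring
      · rw [if_neg hp, if_neg hp, ih _ (by omega)]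
    · rw [pvAltLoop, if_neg hn, pvEvens_nonpos hn, pvV_nil]
      show acc = acc + place * 0
      ring

theorem pvV_append (xs : List Int) (d : Int) : pvV (xs ++ [d]) = pvV xs + d * 10 ^ xs.length := by
  induction xs with
  | nil => simp [pvV_nil, pvV_cons]
  | cons x t ih =>
    simp only [List.cons_append, pvV_cons, ih, List.length_cons]
    ring

theorem foldl_eq_pvV : ∀ (ds : List Int) (acc : Int),
    List.foldl (fun a d => a * 10 + d) acc ds = pvV ds.reverse + acc * 10 ^ ds.length := by
  intro ds
  induction ds with
  | nil => intro acc; simp [pvV_nil]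
  | cons d t ih =>
    intro acc
    simp only [List.foldl_cons, List.reverse_cons, List.length_cons, ih, pvV_append,
      List.length_reverse]
    ring

-- digit extraction inverts pvV up to the trailing zeros of the digit list
theorem pvDigits_pvV : ∀ (ds : List Int), (∀ d ∈ ds, 0 ≤ d ∧ d < 10) →
    pvDigits (pvV ds) = ((ds.reverse.dropWhile (fun d => d == 0))).reverse := by
  intro ds
  induction ds with
  | nil =>
    intro _
    rw [pvV_nil, pvDigits_nonpos (by norm_num)]
    rfl
  | cons d t ih =>
    intro hb
    have hd : 0 ≤ d ∧ d < 10 := hb d (by simp)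
    have hbt : ∀ x ∈ t, 0 ≤ x ∧ x < 10 := fun x hx => hb x (by simp [hx])
    have ht : 0 ≤ pvV t := pvV_nonneg t (fun x hx => (hbt x hx).1)
    rw [pvV_cons]
    by_cases h0 : 0 < d + 10 * pvV t
    · rw [pvDigits_pos h0]
      have hmod : PySem.Int.mod (d + 10 * pvV t) 10 = d := by
        rw [PySem.Int.mod_eq_emod_of_pos (by norm_num), Int.add_mul_emod_self_left,
          Int.emod_eq_of_lt hd.1 hd.2]
      have hdiv : PySem.Int.floordiv (d + 10 * pvV t) 10 = pvV t := by
        rw [PySem.Int.floordiv_eq_ediv_of_pos (by norm_num),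
          Int.add_mul_ediv_left _ _ (by norm_num : (10:Int) ≠ 0),
          Int.ediv_eq_zero_of_lt hd.1 hd.2]
        ring
      rw [hmod, hdiv, ih hbt]
      by_cases he : t.reverse.dropWhile (fun d => d == 0) = []
      · have hall : ∀ x ∈ t, x = 0 := by
          intro x hx
          have hx0 := (List.dropWhile_eq_nil_iff).mp he x (by simp [hx])
          simpa using hx0
        have hvt : pvV t = 0 := pvV_all_zero t hall
        have hdne : (d == 0) = false := by
          have : ¬ d = 0 := by omega
          simp [this]
        simp [List.dropWhile_append, he, List.dropWhile, hdne]
      · simp [List.dropWhile_append, List.isEmpty_iff, he, List.reverse_append]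
    · have hd0 : d = 0 := by omega
      have hvt : pvV t = 0 := by omega
      rw [pvDigits_nonpos (by omega)]
      have hall : ∀ x ∈ t, x = 0 := pvV_zero_all t hbt hvt
      have hnil : List.dropWhile (fun d => d == 0) (t.reverse ++ [d]) = [] := by
        rw [List.dropWhile_eq_nil_iff]
        intro x hx
        simp only [List.mem_append, List.mem_reverse, List.mem_singleton] at hx
        rcases hx with h1 | h1
        · simp [hall x h1]
        · simp [h1, hd0]
      simp [hnil]

-- the two closed forms of A and B
theorem obtenerPares_eq (pnum : Int) :
    obtenerPares pnum = pvV ((pvEvens pnum).dropWhile (fun d => d == 0)) := by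
  unfold obtenerPares formarNumInverso
  rw [pvOP_eq pnum.toNat pnum (le_refl _) 0, foldl_eq_pvV]
  have hEb : ∀ d ∈ (pvEvens pnum).reverse, 0 ≤ d ∧ d < 10 := by
    intro d hd
    exact pvEvens_bounds pnum d (List.mem_reverse.mp hd)
  have hms : pvV (pvEvens pnum).reverse + 0 * 10 ^ (pvEvens pnum).length
      = pvV (pvEvens pnum).reverse := by ring
  rw [hms, pvFNI_eq _ _ (le_refl _) 0, foldl_eq_pvV, pvDigits_pvV _ hEb]
  simp

theorem obtenerPares_alt_eq (pnum : Int) : obtenerPares_alt pnum = pvV (pvEvens pnum) := by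
  unfold obtenerPares_alt
  rw [pvAlt_eq pnum.toNat pnum (le_refl _) 0 1]
  ring

-- the trailing-zero mechanism, quantitatively
theorem pvV_dropWhile_pos : ∀ (ds : List Int), (∀ d ∈ ds, 0 ≤ d ∧ d < 10) →
    (∃ d ∈ ds, d ≠ 0) → 0 < pvV (ds.dropWhile (fun d => d == 0)) := by
  intro ds
  induction ds with
  | nil => intro _ h; simp at h
  | cons d t ih =>
    intro hb hex
    by_cases hd0 : d = 0
    · have hext : ∃ x ∈ t, x ≠ 0 := by
        rcases hex with ⟨x, hx, hxne⟩
        rcases List.mem_cons.mp hx with h1 | h1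
        · omega
        · exact ⟨x, h1, hxne⟩
      rw [List.dropWhile_cons_of_pos (by simp [hd0])]
      exact ih (fun x hx => hb x (by simp [hx])) hext
    · rw [List.dropWhile_cons_of_neg (by simp [hd0])]
      have hd : 0 ≤ d ∧ d < 10 := hb d (by simp)
      have ht : 0 ≤ pvV t := pvV_nonneg t (fun x hx => (hb x (by simp [hx])).1)
      rw [pvV_cons]
      omega

theorem pvV_eq_pow_mul : ∀ (ds : List Int),
    pvV ds = 10 ^ (ds.length - (ds.dropWhile (fun d => d == 0)).length) *
      pvV (ds.dropWhile (fun d => d == 0)) := by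
  intro ds
  induction ds with
  | nil => simp [pvV_nil]
  | cons d t ih =>
    by_cases hd0 : d = 0
    · subst hd0
      rw [List.dropWhile_cons_of_pos (by simp)]
      have hle := List.length_dropWhile_le (fun d => (d : Int) == 0) t
      have hk : ((0 : Int) :: t).length - (t.dropWhile (fun d => d == 0)).length
          = (t.length - (t.dropWhile (fun d => d == 0)).length) + 1 := by
        simp only [List.length_cons]; omega
      rw [pvV_cons, ih, hk, pow_succ]
      ring
    · rw [List.dropWhile_cons_of_neg (by simp [hd0])]
      simp

-- ===== VERDICT (by name: the statement is the Claim_ definition above) =====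
theorem obtenerPares_spec : Claim_unchanged_obtenerPares := by
  intro pnum _ hnd
  rw [obtenerPares_eq, obtenerPares_alt_eq]
  rw [D_iff] at hnd
  push Not at hnd
  by_cases hp : 0 < pnum
  · cases hE : pvEvens pnum with
    | nil => rfl
    | cons d t =>
      rw [hE] at hnd
      by_cases hd0 : d = 0
      · have hall : ∀ x ∈ d :: t, x = 0 := by
          intro x hx
          by_contra hxne
          exact hxne (hnd hp (by simp [hd0]) x hx)
        have h1 : List.dropWhile (fun d => d == 0) (d :: t) = [] := by
          rw [List.dropWhile_eq_nil_iff]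
          intro x hx
          simp [hall x hx]
        rw [h1, pvV_all_zero _ hall, pvV_nil]
      · rw [List.dropWhile_cons_of_neg (by simp [hd0])]
  · rw [pvEvens_nonpos hp]
    rfl

theorem obtenerPares_changed : Claim_changed_obtenerPares := by
  unfold Claim_changed_obtenerPares
  refine ⟨by decide, ?_, by decide, by decide, by decide⟩
  unfold D_obtenerPares
  decide

theorem obtenerPares_tight : Claim_exact_obtenerPares := by
  intro pnum _ hd
  rw [D_iff] at hd
  obtain ⟨hp, hhead, hex⟩ := hd
  rw [obtenerPares_eq, obtenerPares_alt_eq]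
  set E := pvEvens pnum with hE
  have hb : ∀ d ∈ E, 0 ≤ d ∧ d < 10 := pvEvens_bounds pnum
  have hw : 0 < pvV (E.dropWhile (fun d => d == 0)) := pvV_dropWhile_pos E hb hex
  have hpow := pvV_eq_pow_mul E
  set k := E.length - (E.dropWhile (fun d => d == 0)).length with hk
  have hk1 : 1 ≤ k := by
    cases hEc : E with
    | nil => rw [hEc] at hhead; simp at hhead
    | cons d t =>
      have hd0 : d = 0 := by rw [hEc] at hhead; simpa using hhead
      have hstep : (d :: t).dropWhile (fun d => d == 0) = t.dropWhile (fun d => d == 0) :=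
        List.dropWhile_cons_of_pos (by simp [hd0])
      have hle := List.length_dropWhile_le (fun d => (d : Int) == 0) t
      rw [hk, hEc, hstep]
      simp only [List.length_cons]
      omega
  intro heq
  have h10 : (10:Int) ≤ 10 ^ k := by
    calc (10:Int) = 10 ^ 1 := by ring
    _ ≤ 10 ^ k := pow_le_pow_right₀ (by norm_num) hk1
  have hlt : pvV (E.dropWhile (fun d => d == 0)) < pvV E := by
    rw [hpow]
    nlinarith [hw, h10]
  omega
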